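-- pv_equiv track=rewrite | github.com/XOM91K/EGE | olds/Ilya_2025/25/10.py | F
-- ===== SOURCE A (Python) =====
-- def F(n):
--     l=[]
--     for i in range(2,int(n**0.5)+1):
--         if n%i==0:
--             l.append(i)
--             l.append(n//i)
--     l = sorted(set(l))
--     if len(l)<2 or l ==[]:
--         return 0
--     else:
--         return max(l)-min(l)
-- ===== SOURCE B (Python) =====
-- def F(n):
--     i = 2
--     while i * i <= n:
--         if n % i == 0:
--             return n // i - i
--         i += 1
--     return 0
-- ===== Notes on version B (the rewrite author's own statement) =====
-- stated objective: faster
-- what changed: B scans upward from 2 and returns n//i - i at the FIRST divisor found (the smallest factor i gives min=i and max=n//i), instead of collecting every divisor pair into a list, deduplicating, sorting and taking max-min.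
import Mathlib
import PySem

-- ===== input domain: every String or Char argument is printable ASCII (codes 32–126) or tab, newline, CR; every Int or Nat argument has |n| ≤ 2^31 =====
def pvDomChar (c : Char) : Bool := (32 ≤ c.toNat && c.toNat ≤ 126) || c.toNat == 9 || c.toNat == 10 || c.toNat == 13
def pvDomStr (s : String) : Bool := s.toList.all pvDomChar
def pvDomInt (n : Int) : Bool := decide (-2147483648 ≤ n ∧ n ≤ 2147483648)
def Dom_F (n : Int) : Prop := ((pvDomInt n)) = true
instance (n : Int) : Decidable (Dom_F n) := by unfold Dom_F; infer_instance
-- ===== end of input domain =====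

-- B replaces A's collect-all-divisor-pairs/set/sort/max-min pipeline by an early-exit scan
-- returning n//i - i at the first divisor i (objective: faster, early exit, no list or sort).

-- ===== PORT A =====
-- int(n**0.5): exact equal to Int.sqrt n for the admitted inputs 0 ≤ n ≤ 2^31
-- (double sqrt is correctly rounded and the error is far below the gap to the next integer).
def F (n : Int) : Int :=
  let l : List Int :=
    (PySem.List.pyRange 2 (Int.sqrt n + 1) 1).foldl
      (fun acc i =>
        if PySem.Int.mod n i = 0 then (acc ++ [i]) ++ [PySem.Int.floordiv n i] else acc) []
  let l2 := PySem.List.sorted (PySem.Set.ofList l) (fun x => x) false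
  if l2.length < 2 ∨ l2 = [] then 0
  else (PySem.List.max? l2 (fun x => x)).getD 0 - (PySem.List.min? l2 (fun x => x)).getD 0

-- ===== PORT B =====
-- 'while i * i <= n' ported with a Nat fuel bound (n.toNat + 2 ≥ number of iterations: the loop
-- stops once i * i > n); the 0-fuel branch is unreachable, a totality guard only.
def F_altLoop (n : Int) : Nat → Int → Int
  | 0, _ => 0
  | fuel + 1, i =>
    if i * i ≤ n then
      if PySem.Int.mod n i = 0 then PySem.Int.floordiv n i - i
      else F_altLoop n fuel (i + 1)
    else 0

def F_alt (n : Int) : Int := F_altLoop n (n.toNat + 2) 2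

-- ===== PRECONDITION & SPEC =====
-- Pre_F excludes exactly the inputs where A raises: for n < 0, n**0.5 is complex and int() raises TypeError.
def Pre_F (n : Int) : Prop := 0 ≤ n
instance (n : Int) : Decidable (Pre_F n) := by unfold Pre_F; infer_instance
def pvWitness_F : Int := (12)

def Spec_F (n : Int) (out : Int) : Prop := out = F_alt n
instance (n : Int) (out : Int) : Decidable (Spec_F n out) := by unfold Spec_F; infer_instance

-- ===== CLAIM (what is proved, stated in full; the proofs are below) =====
def Claim_equal_F : Prop := ∀ (n : Int), Dom_F n → Pre_F n → Spec_F n (F n)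

-- ===== LEMMAS AND PROOFS =====

lemma pv_le_sqrt_iff (n i : Int) (hn : 0 ≤ n) (hi : 0 ≤ i) : i ≤ Int.sqrt n ↔ i * i ≤ n := by
  unfold Int.sqrt
  constructor
  · intro h
    have h1 : i.toNat ≤ Nat.sqrt n.toNat := by omega
    have h2 := Nat.le_sqrt.mp h1
    calc i * i = ((i.toNat * i.toNat : Nat) : Int) := by push_cast [Int.toNat_of_nonneg hi]; ring
    _ ≤ ((n.toNat : Nat) : Int) := by exact_mod_cast h2
    _ = n := Int.toNat_of_nonneg hn
  · intro h
    have h2 : i.toNat * i.toNat ≤ n.toNat := by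
      have h3 : ((i.toNat * i.toNat : Nat) : Int) ≤ ((n.toNat : Nat) : Int) := by
        push_cast [Int.toNat_of_nonneg hi, Int.toNat_of_nonneg hn]; nlinarith
      exact_mod_cast h3
    have := Nat.le_sqrt.mpr h2
    omega

lemma pv_loop_none (n : Int) : ∀ (fuel : Nat) (i : Int),
    (∀ j : Int, i ≤ j → j * j ≤ n → PySem.Int.mod n j ≠ 0) → F_altLoop n fuel i = 0 := by
  intro fuel
  induction fuel with
  | zero => intro i _; rfl
  | succ fuel ih =>
    intro i h
    rw [F_altLoop]
    by_cases hin : i * i ≤ n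
    · rw [if_pos hin, if_neg (h i le_rfl hin)]
      exact ih (i + 1) (fun j hj hjj => h j (by omega) hjj)
    · rw [if_neg hin]

lemma pv_loop_found (n p : Int) (hp : 0 < p) (hpn : p * p ≤ n) (hpd : PySem.Int.mod n p = 0) :
    ∀ (fuel : Nat) (i : Int), 0 < i → i ≤ p → p - i < (fuel : Int) →
      (∀ j : Int, i ≤ j → j < p → PySem.Int.mod n j ≠ 0) →
      F_altLoop n fuel i = PySem.Int.floordiv n p - p := by
  intro fuel
  induction fuel with
  | zero => intro i _ h1 h2 _; exfalso; push_cast at h2; omega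
  | succ fuel ih =>
    intro i hipos hip hfuel h
    have hin : i * i ≤ n := le_trans (mul_le_mul hip hip (by omega) (by omega)) hpn
    rw [F_altLoop, if_pos hin]
    by_cases hie : i = p
    · rw [if_pos (hie ▸ hpd)]
      rw [hie]
    · have hiltp : i < p := lt_of_le_of_ne hip hie
      rw [if_neg (h i le_rfl hiltp)]
      exact ih (i + 1) (by omega) (by omega) (by push_cast at hfuel ⊢; omega)
        (fun j hj hj2 => h j (by omega) hj2)

lemma pv_fold_shape (n : Int) : ∀ (L : List Int) (acc : List Int),
    L.foldl (fun acc i =>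
        if PySem.Int.mod n i = 0 then (acc ++ [i]) ++ [PySem.Int.floordiv n i] else acc) acc
      = acc ++ (L.filter (fun i => decide (PySem.Int.mod n i = 0))).flatMap
          (fun i => [i, PySem.Int.floordiv n i]) := by
  intro L
  induction L with
  | nil => intro acc; simp
  | cons x t ih =>
    intro acc
    simp only [List.foldl_cons, List.filter_cons]
    by_cases hx : PySem.Int.mod n x = 0
    · rw [if_pos hx, ih]; simp [hx]
    · rw [if_neg hx, ih]; simp [hx]

theorem pv_main (n : Int) (hn : 0 ≤ n) : F n = F_alt n := by
  have hs0 : 0 ≤ Int.sqrt n := Int.sqrt_nonneg n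
  simp only [F, pv_fold_shape, List.nil_append]
  set s := Int.sqrt n with hs
  set D := (PySem.List.pyRange 2 (s + 1)).filter
      (fun i => decide (PySem.Int.mod n i = 0)) with hDdef
  have hD : ∀ j : Int, j ∈ D ↔ (2 ≤ j ∧ j ≤ s ∧ PySem.Int.mod n j = 0) := by
    intro j
    simp only [hDdef, List.mem_filter, PySem.List.mem_pyRange_one, decide_eq_true_eq]
    constructor
    · rintro ⟨⟨h1, h2⟩, h3⟩; exact ⟨h1, by omega, h3⟩
    · rintro ⟨h1, h2, h3⟩; exact ⟨⟨h1, by omega⟩, h3⟩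
  have hpair : D.Pairwise (· < ·) :=
    List.Pairwise.sublist List.filter_sublist (PySem.List.pairwise_lt_pyRange_one 2 (s + 1))
  set l := D.flatMap (fun i => [i, PySem.Int.floordiv n i]) with hldef
  set l2 := PySem.List.sorted (PySem.Set.ofList l) (fun x => x) false with hl2def
  have hmem2 : ∀ x : Int, x ∈ l2 ↔ x ∈ l := by
    intro x; rw [hl2def, PySem.List.mem_sorted, PySem.Set.mem_ofList]
  have hnd : l2.Nodup :=
    (List.Perm.nodup_iff (PySem.List.sorted_perm _ _ _)).mpr (PySem.Set.nodup_ofList l)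
  by_cases hDnil : D = []
  · have hl : l = [] := by rw [hldef, hDnil]; rfl
    have hl2 : l2 = [] := by
      rw [hl2def, PySem.List.sorted_eq_nil_iff, hl]; rfl
    rw [if_pos (Or.inl (by rw [hl2]; simp))]
    have hB : F_alt n = 0 := by
      apply pv_loop_none
      intro j hj hjj hmod
      have hjs : j ≤ s := (pv_le_sqrt_iff n j hn (by omega)).mpr hjj
      have hjD : j ∈ D := (hD j).mpr ⟨hj, hjs, hmod⟩
      rw [hDnil] at hjD
      simp at hjD
    rw [hB]
  · obtain ⟨p, rest, hDc⟩ := List.exists_cons_of_ne_nil hDnil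
    have hpD : p ∈ D := by rw [hDc]; exact List.mem_cons_self
    obtain ⟨hp2, hps, hpmod⟩ := (hD p).mp hpD
    have hpdvd : p ∣ n := (PySem.Int.mod_eq_zero_iff_dvd n p).mp hpmod
    have hppn : p * p ≤ n := (pv_le_sqrt_iff n p hn (by omega)).mp hps
    have hmin : ∀ j ∈ D, p ≤ j := by
      intro j hj
      rw [hDc] at hj hpair
      rcases List.mem_cons.mp hj with h | h
      · omega
      · exact le_of_lt ((List.pairwise_cons.mp hpair).1 j h)
    have hB : F_alt n = PySem.Int.floordiv n p - p := by
      have hpp : p ≤ p * p := le_mul_of_one_le_left (by omega) (by omega)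
      apply pv_loop_found n p (by omega) hppn hpmod (n.toNat + 2) 2 (by omega) (by omega)
        (by push_cast; omega)
      intro j hj hjp hmod
      have hjD : j ∈ D := (hD j).mpr ⟨hj, by omega, hmod⟩
      exact absurd (hmin j hjD) (by omega)
    set q := n / p with hqdef
    have hfq : PySem.Int.floordiv n p = q := PySem.Int.floordiv_eq_ediv_of_pos (by omega)
    have hpq : p ≤ q := (Int.le_ediv_iff_mul_le (by omega)).mpr hppn
    have hbound : ∀ x ∈ l, p ≤ x ∧ x ≤ q := by
      intro x hx
      rw [hldef, List.mem_flatMap] at hx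
      obtain ⟨i, hiD, hxi⟩ := hx
      obtain ⟨hi2, his, himod⟩ := (hD i).mp hiD
      have hidvd : i ∣ n := (PySem.Int.mod_eq_zero_iff_dvd n i).mp himod
      have hiin : i * i ≤ n := (pv_le_sqrt_iff n i hn (by omega)).mp his
      have hfi : PySem.Int.floordiv n i = n / i := PySem.Int.floordiv_eq_ediv_of_pos (by omega)
      have hile : i ≤ n / i := (Int.le_ediv_iff_mul_le (by omega)).mpr hiin
      have hpi : p ≤ i := hmin i hiD
      have hdivle : n / i ≤ q := by
        rw [hqdef]
        refine (Int.le_ediv_iff_mul_le (by omega)).mpr ?_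
        calc n / i * p ≤ n / i * i :=
              mul_le_mul_of_nonneg_left hpi (Int.ediv_nonneg hn (by omega))
        _ = n := Int.ediv_mul_cancel hidvd
      simp only [List.mem_cons, List.not_mem_nil, or_false] at hxi
      rcases hxi with h | h
      · exact h ▸ ⟨hpi, le_trans hile hdivle⟩
      · rw [h, hfi]; exact ⟨le_trans hpi hile, hdivle⟩
    have hpl : p ∈ l := by
      rw [hldef, List.mem_flatMap]; exact ⟨p, hpD, by simp⟩
    have hql : q ∈ l := by
      rw [hldef, List.mem_flatMap]
      refine ⟨p, hpD, ?_⟩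
      rw [hfq]; simp
    rw [hB, hfq]
    by_cases hq_eq : q = p
    · have hall : ∀ x ∈ l2, x = p := by
        intro x hx
        obtain ⟨h1, h2⟩ := hbound x ((hmem2 x).mp hx)
        omega
      have hlen : l2.length < 2 := by
        rcases hc : l2 with _ | ⟨a, _ | ⟨b, t⟩⟩
        · simp
        · simp
        · exfalso
          have ha : a = p := hall a (by rw [hc]; simp)
          have hb : b = p := hall b (by rw [hc]; simp)
          rw [hc] at hnd
          simp [ha, hb] at hnd
      rw [if_pos (Or.inl hlen)]
      omega
    · have hpl2 : p ∈ l2 := (hmem2 p).mpr hpl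
      have hql2 : q ∈ l2 := (hmem2 q).mpr hql
      have hcond : ¬(l2.length < 2 ∨ l2 = []) := by
        rcases hc : l2 with _ | ⟨a, _ | ⟨b, t⟩⟩
        · rw [hc] at hpl2; simp at hpl2
        · rw [hc] at hpl2 hql2
          simp at hpl2 hql2
          omega
        · simp
      rw [if_neg hcond]
      obtain ⟨m, hm⟩ : ∃ m, PySem.List.max? l2 (fun x => x) = some m := by
        cases hmx : PySem.List.max? l2 (fun x => x) with
        | none =>
          rw [PySem.List.max?_eq_none_iff] at hmx
          rw [hmx] at hpl2; simp at hpl2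
        | some m => exact ⟨m, rfl⟩
      obtain ⟨w, hw⟩ : ∃ w, PySem.List.min? l2 (fun x => x) = some w := by
        cases hmn : PySem.List.min? l2 (fun x => x) with
        | none =>
          rw [PySem.List.min?_eq_none_iff] at hmn
          rw [hmn] at hpl2; simp at hpl2
        | some w => exact ⟨w, rfl⟩
      rw [hm, hw]
      have hmq : m = q := by
        have h1 := (hbound m ((hmem2 m).mp (PySem.List.max?_mem hm))).2
        have h2 := PySem.List.max?_isMax hm q hql2
        simp at h2
        omega
      have hwp : w = p := by
        have h1 := (hbound w ((hmem2 w).mp (PySem.List.min?_mem hw))).1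
        have h2 := PySem.List.min?_isMin hw p hpl2
        simp at h2
        omega
      simp [hmq, hwp]

-- ===== VERDICT (by name: the statement is the Claim_ definition above) =====
theorem F_spec : Claim_equal_F := by
  intro n _ hpre
  unfold Spec_F
  exact pv_main n hpre
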